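-- pv_equiv track=rewrite | github.com/GusRob/TerminalGames | terminalOsXs/game.py | countTwoRow
-- ===== SOURCE A (Python) =====
-- from collections import Counter
--
-- def countTwoRow(stateTmp):
--     trans = list(zip(*stateTmp)) #transposed matrix
--     threes = []
--     for i in range(3):
--         threes.append("".join(stateTmp[i]))
--         threes.append("".join(trans[i]))
--     threes.append(stateTmp[0][0] + stateTmp[1][1] + stateTmp[2][2])
--     threes.append(stateTmp[2][0] + stateTmp[1][1] + stateTmp[0][2])
--     collect = Counter(threes)
--     noOfXPairs = collect["XX "] + collect["X X"] + collect[" XX"]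
--     noOfOPairs = collect["OO "] + collect["O O"] + collect[" OO"]
--     return noOfXPairs, noOfOPairs
-- ===== SOURCE B (Python) =====
-- def _pairs(line):
--     if len(line) == 3 and line.count(' ') == 1:
--         if line.count('X') == 2:
--             return (1, 0)
--         if line.count('O') == 2:
--             return (0, 1)
--     return (0, 0)
--
-- def countTwoRow(stateTmp):
--     lines = ["".join(stateTmp[i]) for i in range(3)]
--     for j in range(3):
--         lines.append("".join(row[j] for row in stateTmp))
--     lines.append(stateTmp[0][0] + stateTmp[1][1] + stateTmp[2][2])
--     lines.append(stateTmp[2][0] + stateTmp[1][1] + stateTmp[0][2])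
--     x = o = 0
--     for line in lines:
--         dx, do = _pairs(line)
--         x += dx
--         o += do
--     return x, o
-- ===== Notes on version B (the rewrite author's own statement) =====
-- stated objective: simpler
-- what changed: B never transposes the board: rows come straight from stateTmp and each column is joined by indexing row[j] across all rows, and instead of a Counter with six exact-pattern lookups each line is classified by its character composition (length 3, one ' ', two 'X' or two 'O') via a helper returning an (x,o) increment that a single accumulator loop sums.
import Mathlib
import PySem

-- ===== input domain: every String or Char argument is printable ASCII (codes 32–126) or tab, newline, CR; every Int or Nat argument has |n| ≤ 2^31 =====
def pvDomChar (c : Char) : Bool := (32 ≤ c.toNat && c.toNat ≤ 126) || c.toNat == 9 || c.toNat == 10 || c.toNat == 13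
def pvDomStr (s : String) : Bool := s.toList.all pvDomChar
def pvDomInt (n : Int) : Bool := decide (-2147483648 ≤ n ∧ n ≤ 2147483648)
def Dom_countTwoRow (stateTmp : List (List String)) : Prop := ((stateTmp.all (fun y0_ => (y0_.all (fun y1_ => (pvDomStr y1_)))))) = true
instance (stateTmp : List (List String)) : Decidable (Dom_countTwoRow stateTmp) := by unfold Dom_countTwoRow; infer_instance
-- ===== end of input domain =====

-- B never transposes: rows are read directly, each column is joined by indexing row[j] over all
-- rows, and every line is classified by its character composition (via a helper returning an
-- (x,o) increment summed by one accumulator loop) instead of Counter + six pattern lookups;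
-- objective: simpler.

-- ===== PORT A =====
-- min row length, for zip(*stateTmp) (Python zip truncates to the shortest row)
def pvMinLen : List (List String) → Nat
  | [] => 0
  | [r] => r.length
  | r :: rs => min r.length (pvMinLen rs)

-- trans = list(zip(*stateTmp)) : column j is the j-th element of every row, j < min row length
def pvZipStar (m : List (List String)) : List (List String) :=
  match m with
  | [] => []
  | _ => (List.range (pvMinLen m)).map (fun j => m.map (fun row => row.getD j ""))

-- A's 8 line strings: for i in range(3) rows and transposed columns interleaved, then the
-- two diagonals (Python '+' on the cell strings = join "")
def pvLines (stateTmp : List (List String)) : List String :=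
  let trans := pvZipStar stateTmp
  let base := (PySem.List.pyRange 0 3 1).foldl
    (fun acc i =>
      (acc ++ [PySem.Str.join "" (PySem.List.pyGetD stateTmp i [])])
        ++ [PySem.Str.join "" (PySem.List.pyGetD trans i [])]) []
  let g := fun (i j : Int) => PySem.List.pyGetD (PySem.List.pyGetD stateTmp i []) j ""
  base ++ [PySem.Str.join "" [g 0 0, g 1 1, g 2 2], PySem.Str.join "" [g 2 0, g 1 1, g 0 2]]

def countTwoRow (stateTmp : List (List String)) : Int × Int :=
  let threes := pvLines stateTmp
  let collect := PySem.Dict.counter threes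
  (collect.getD "XX " 0 + collect.getD "X X" 0 + collect.getD " XX" 0,
   collect.getD "OO " 0 + collect.getD "O O" 0 + collect.getD " OO" 0)

-- ===== PORT B =====
-- helper _pairs: the (x,o) increment a line contributes, decided by its composition
def pvPairs (line : String) : Int × Int :=
  if PySem.Str.len line == 3 && PySem.Str.count line " " == 1 then
    if PySem.Str.count line "X" == 2 then (1, 0)
    else if PySem.Str.count line "O" == 2 then (0, 1)
    else (0, 0)
  else (0, 0)

-- B's lines: the three rows, then the three columns joined by indexing row[j] over all rows
-- (no transposed matrix), then the two diagonals
def pvLinesB (stateTmp : List (List String)) : List String :=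
  let rows := (PySem.List.pyRange 0 3 1).map
    (fun i => PySem.Str.join "" (PySem.List.pyGetD stateTmp i []))
  let withCols := (PySem.List.pyRange 0 3 1).foldl
    (fun acc j => acc ++ [PySem.Str.join "" (stateTmp.map (fun row => PySem.List.pyGetD row j ""))]) rows
  let g := fun (i j : Int) => PySem.List.pyGetD (PySem.List.pyGetD stateTmp i []) j ""
  withCols ++ [PySem.Str.join "" [g 0 0, g 1 1, g 2 2], PySem.Str.join "" [g 2 0, g 1 1, g 0 2]]

def countTwoRow_alt (stateTmp : List (List String)) : Int × Int :=
  (pvLinesB stateTmp).foldl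
    (fun acc line => (acc.1 + (pvPairs line).1, acc.2 + (pvPairs line).2)) (0, 0)

-- ===== PRECONDITION & SPEC =====
-- exactly the inputs where Python A returns: fewer than 3 rows, or any row shorter
-- than 3, makes stateTmp[i] / trans[i] / the diagonal indexing raise IndexError.
def Pre_countTwoRow (stateTmp : List (List String)) : Prop :=
  3 ≤ stateTmp.length ∧ ∀ r ∈ stateTmp, 3 ≤ r.length
instance (stateTmp : List (List String)) : Decidable (Pre_countTwoRow stateTmp) := by
  unfold Pre_countTwoRow; infer_instance
def pvWitness_countTwoRow : List (List String) :=
  [["X", "O", " "], [" ", "X", "O"], ["O", " ", "X"]]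

def Spec_countTwoRow (stateTmp : List (List String)) (out : Int × Int) : Prop := out = countTwoRow_alt stateTmp
instance (stateTmp : List (List String)) (out : Int × Int) : Decidable (Spec_countTwoRow stateTmp out) := by unfold Spec_countTwoRow; infer_instance

-- ===== CLAIM (what is proved, stated in full; the proofs are below) =====
def Claim_equal_countTwoRow : Prop := ∀ (stateTmp : List (List String)), Dom_countTwoRow stateTmp → Pre_countTwoRow stateTmp → Spec_countTwoRow stateTmp (countTwoRow stateTmp)

-- ===== LEMMAS AND PROOFS =====

-- s.count(c) for a one-character needle is the number of occurrences of the character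
lemma pvCount_go (c : Char) (fuel : Nat) : ∀ (l : List Char) (acc : Nat), l.length ≤ fuel →
    PySem.Chars.count.go [c] fuel l acc = acc + l.count c := by
  induction fuel with
  | zero =>
    intro l acc h
    have hl : l = [] := List.eq_nil_of_length_eq_zero (Nat.le_zero.mp h)
    subst hl
    rw [PySem.Chars.count.go]
    simp
  | succ n ih =>
    intro l acc h
    cases l with
    | nil =>
      rw [PySem.Chars.count.go]
      simp
      omega
    | cons hd t =>
      rw [PySem.Chars.count.go]
      by_cases hc : c = hd
      · subst hc
        simp only [List.isPrefixOf, Bool.and_true, beq_self_eq_true, if_pos,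
          List.length_cons, List.drop_succ_cons, List.length_nil, List.drop_zero]
        rw [ih t (acc + 1) (by simpa using h)]
        have hcount : List.count c (c :: t) = List.count c t + 1 := by simp
        omega
      · have hc' : ¬hd = c := fun hh => hc hh.symm
        simp only [List.isPrefixOf, Bool.and_true]
        rw [if_neg (by simp [hc]), ih t acc (by simpa using h)]
        simp [hc']

lemma pvCount_singleton (c : Char) (l : List Char) : PySem.Chars.count l [c] = l.count c := by
  rw [PySem.Chars.count, if_neg (by simp)]
  rw [pvCount_go c l.length l 0 (le_refl _)]
  simp

-- a 3-char line has two of x and one ' ' iff it is one of the three patterns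
lemma pvComp3 (x : Char) (l : List Char) (hx : x = 'X' ∨ x = 'O') :
    (l.length = 3 ∧ l.count ' ' = 1 ∧ l.count x = 2) ↔
      (l = [x, x, ' '] ∨ l = [x, ' ', x] ∨ l = [' ', x, x]) := by
  have hxs : x ≠ ' ' := by rcases hx with rfl | rfl <;> decide
  have hxs' : ¬(' ' = x) := fun h => hxs h.symm
  constructor
  · rintro ⟨hlen, hsp, hcx⟩
    obtain ⟨a, b, c, rfl⟩ := List.length_eq_three.mp hlen
    simp only [List.count_cons, List.count_nil] at hsp hcx
    by_cases h1 : a = x <;> by_cases h2 : b = x <;> by_cases h3 : c = x <;>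
      by_cases h4 : a = ' ' <;> by_cases h5 : b = ' ' <;> by_cases h6 : c = ' ' <;>
      simp_all
  · intro h
    rcases hx with rfl | rfl <;> rcases h with rfl | rfl | rfl <;> decide

lemma pvPairs_class (s : String) :
    pvPairs s =
      ((if s = "XX " then 1 else 0) + (if s = "X X" then 1 else 0) + (if s = " XX" then 1 else 0),
       (if s = "OO " then 1 else 0) + (if s = "O O" then 1 else 0) + (if s = " OO" then 1 else 0)) := by
  by_cases e1 : s = "XX "
  · subst e1; unfold pvPairs; rw [if_pos (by decide), if_pos (by decide)]; simp
  by_cases e2 : s = "X X"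
  · subst e2; unfold pvPairs; rw [if_pos (by decide), if_pos (by decide)]; simp
  by_cases e3 : s = " XX"
  · subst e3; unfold pvPairs; rw [if_pos (by decide), if_pos (by decide)]; simp
  by_cases e4 : s = "OO "
  · subst e4; unfold pvPairs
    rw [if_pos (by decide), if_neg (by decide), if_pos (by decide)]; simp
  by_cases e5 : s = "O O"
  · subst e5; unfold pvPairs
    rw [if_pos (by decide), if_neg (by decide), if_pos (by decide)]; simp
  by_cases e6 : s = " OO"
  · subst e6; unfold pvPairs
    rw [if_pos (by decide), if_neg (by decide), if_pos (by decide)]; simp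
  have hX : ¬ (s.toList.length = 3 ∧ s.toList.count ' ' = 1 ∧ s.toList.count 'X' = 2) := by
    rw [pvComp3 'X' s.toList (Or.inl rfl)]
    rintro (h | h | h)
    · exact e1 (String.toList_inj.mp (h.trans rfl))
    · exact e2 (String.toList_inj.mp (h.trans rfl))
    · exact e3 (String.toList_inj.mp (h.trans rfl))
  have hO : ¬ (s.toList.length = 3 ∧ s.toList.count ' ' = 1 ∧ s.toList.count 'O' = 2) := by
    rw [pvComp3 'O' s.toList (Or.inr rfl)]
    rintro (h | h | h)
    · exact e4 (String.toList_inj.mp (h.trans rfl))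
    · exact e5 (String.toList_inj.mp (h.trans rfl))
    · exact e6 (String.toList_inj.mp (h.trans rfl))
  simp only [if_neg e1, if_neg e2, if_neg e3, if_neg e4, if_neg e5, if_neg e6, add_zero]
  unfold pvPairs
  split_ifs with h1 h2 h3 <;> try rfl
  · exfalso
    simp only [PySem.Str.len_eq, PySem.Str.count_eq, Bool.and_eq_true, beq_iff_eq] at h1 h2
    rw [show (" " : String).toList = [' '] from rfl, pvCount_singleton] at h1
    rw [show ("X" : String).toList = ['X'] from rfl, pvCount_singleton] at h2
    exact hX ⟨by exact_mod_cast h1.1, h1.2, h2⟩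
  · exfalso
    simp only [PySem.Str.len_eq, PySem.Str.count_eq, Bool.and_eq_true, beq_iff_eq] at h1 h3
    rw [show (" " : String).toList = [' '] from rfl, pvCount_singleton] at h1
    rw [show ("O" : String).toList = ['O'] from rfl, pvCount_singleton] at h3
    exact hO ⟨by exact_mod_cast h1.1, h1.2, h3⟩

-- B's accumulator loop computes pattern counts of its line list
lemma pvFoldl_pairs (L : List String) (a b : Int) :
    L.foldl (fun acc line => (acc.1 + (pvPairs line).1, acc.2 + (pvPairs line).2)) (a, b) =
      (a + (((L.count "XX " : Int)) + L.count "X X" + L.count " XX"),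
       b + (((L.count "OO " : Int)) + L.count "O O" + L.count " OO")) := by
  induction L generalizing a b with
  | nil => simp
  | cons s t ih =>
    rw [List.foldl_cons, ih, pvPairs_class]
    simp [List.count_cons]
    constructor <;> split_ifs <;> ring

-- a nonempty list of rows all of length ≥ 3 has min row length ≥ 3
lemma pvMinLen_ge (st : List (List String)) (hne : st ≠ [])
    (hr : ∀ r ∈ st, 3 ≤ r.length) : 3 ≤ pvMinLen st := by
  induction st with
  | nil => exact absurd rfl hne
  | cons a t ih =>
    cases t with
    | nil => simpa [pvMinLen] using hr a (by simp)
    | cons b u =>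
      have h1 := hr a (by simp)
      have h2 := ih (by simp) (fun r hrm => hr r (List.mem_cons_of_mem a hrm))
      simp [pvMinLen] at h2 ⊢
      exact ⟨h1, h2⟩

-- under Pre_, both line lists are explicit 8-element lists that are permutations of each other
lemma pvLines_explicit (a b c : List String) (rest : List (List String))
    (hr : ∀ r ∈ (a :: b :: c :: rest), 3 ≤ r.length) :
    pvLines (a :: b :: c :: rest) =
      [PySem.Str.join "" a,
       PySem.Str.join "" ((a :: b :: c :: rest).map (fun row => row.getD 0 "")),
       PySem.Str.join "" b,
       PySem.Str.join "" ((a :: b :: c :: rest).map (fun row => row.getD 1 "")),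
       PySem.Str.join "" c,
       PySem.Str.join "" ((a :: b :: c :: rest).map (fun row => row.getD 2 "")),
       PySem.Str.join "" [a.getD 0 "", b.getD 1 "", c.getD 2 ""],
       PySem.Str.join "" [c.getD 0 "", b.getD 1 "", a.getD 2 ""]] := by
  have hmin : 3 ≤ pvMinLen (a :: b :: c :: rest) := pvMinLen_ge _ (by simp) hr
  have hrange : PySem.List.pyRange 0 3 1 = [0, 1, 2] := by decide
  have htrans : pvZipStar (a :: b :: c :: rest)
      = (List.range (pvMinLen (a :: b :: c :: rest))).map
          (fun j => (a :: b :: c :: rest).map (fun row => row.getD j "")) := rfl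
  unfold pvLines
  rw [hrange, htrans]
  simp only [List.foldl_cons, List.foldl_nil, List.nil_append, PySem.List.pyGetD_ofNat']
  rw [PySem.List.getD_map_range _ _ 0 _ (by omega), PySem.List.getD_map_range _ _ 1 _ (by omega),
      PySem.List.getD_map_range _ _ 2 _ (by omega)]
  simp [List.getD]

lemma pvLinesB_explicit (a b c : List String) (rest : List (List String)) :
    pvLinesB (a :: b :: c :: rest) =
      [PySem.Str.join "" a,
       PySem.Str.join "" b,
       PySem.Str.join "" c,
       PySem.Str.join "" ((a :: b :: c :: rest).map (fun row => row.getD 0 "")),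
       PySem.Str.join "" ((a :: b :: c :: rest).map (fun row => row.getD 1 "")),
       PySem.Str.join "" ((a :: b :: c :: rest).map (fun row => row.getD 2 "")),
       PySem.Str.join "" [a.getD 0 "", b.getD 1 "", c.getD 2 ""],
       PySem.Str.join "" [c.getD 0 "", b.getD 1 "", a.getD 2 ""]] := by
  have hrange : PySem.List.pyRange 0 3 1 = [0, 1, 2] := by decide
  unfold pvLinesB
  rw [hrange]
  simp only [List.map_cons, List.map_nil, List.foldl_cons, List.foldl_nil,
    PySem.List.pyGetD_ofNat']
  simp [List.getD]

-- counting any value in the interleaved list equals counting it in B's grouped list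
lemma pvCount_interleave (r0 r1 r2 c0 c1 c2 d1 d2 s : String) :
    List.count s [r0, c0, r1, c1, r2, c2, d1, d2] =
      List.count s [r0, r1, r2, c0, c1, c2, d1, d2] := by
  simp only [List.count_cons, List.count_nil]
  omega

-- ===== VERDICT (by name: the statement is the Claim_ definition above) =====
theorem countTwoRow_spec : Claim_equal_countTwoRow := by
  intro st _ hpre
  obtain ⟨hlen, hr⟩ := hpre
  obtain ⟨a, t1⟩ : ∃ a t, st = a :: t := by
    cases st with | nil => simp at hlen | cons a t => exact ⟨a, t, rfl⟩
  obtain ⟨t, rfl⟩ := t1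
  obtain ⟨b, u, rfl⟩ : ∃ b u, t = b :: u := by
    cases t with | nil => simp at hlen | cons b u => exact ⟨b, u, rfl⟩
  obtain ⟨c, rest, rfl⟩ : ∃ c r, u = c :: r := by
    cases u with | nil => simp at hlen | cons c r => exact ⟨c, r, rfl⟩
  unfold Spec_countTwoRow countTwoRow countTwoRow_alt
  rw [pvFoldl_pairs, pvLines_explicit a b c rest hr, pvLinesB_explicit a b c rest]
  simp only [PySem.Dict.getD_counter]
  rw [pvCount_interleave _ _ _ _ _ _ _ _ "XX ", pvCount_interleave _ _ _ _ _ _ _ _ "X X",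
    pvCount_interleave _ _ _ _ _ _ _ _ " XX", pvCount_interleave _ _ _ _ _ _ _ _ "OO ",
    pvCount_interleave _ _ _ _ _ _ _ _ "O O", pvCount_interleave _ _ _ _ _ _ _ _ " OO"]
  simp
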